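-- pv_equiv track=rewrite | github.com/AdamZhouSE/pythonHomework | Code/CodeRecords/2465/60708/302148.py | find
-- ===== SOURCE A (Python) =====
-- def find(list):
--     if(len(list)<=1):
--         return 1
--     for i in list:
--         sum=0
--         for j in list:
--             if j>=i:
--                 sum=sum+1
--         if sum<=i:
--             return sum
-- ===== SOURCE B (Python) =====
-- def find(list):
--     n = len(list)
--     if n <= 1:
--         return 1
--     s = sorted(list)
--     first = {}
--     for idx, v in enumerate(s):
--         if v not in first:
--             first[v] = idx
--     for i in list:
--         cnt = n - first[i]
--         if cnt <= i:
--             return cnt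
--     return None
-- ===== Notes on version B (the rewrite author's own statement) =====
-- stated objective: faster
-- what changed: B replaces A's nested rescan (for each element, count the whole list again) by one sort plus a single pass that records each value's first index in the sorted list in a dict, so each element's ≥-count is an O(1) lookup (n - first[i]) during the ordered scan.
import Mathlib
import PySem

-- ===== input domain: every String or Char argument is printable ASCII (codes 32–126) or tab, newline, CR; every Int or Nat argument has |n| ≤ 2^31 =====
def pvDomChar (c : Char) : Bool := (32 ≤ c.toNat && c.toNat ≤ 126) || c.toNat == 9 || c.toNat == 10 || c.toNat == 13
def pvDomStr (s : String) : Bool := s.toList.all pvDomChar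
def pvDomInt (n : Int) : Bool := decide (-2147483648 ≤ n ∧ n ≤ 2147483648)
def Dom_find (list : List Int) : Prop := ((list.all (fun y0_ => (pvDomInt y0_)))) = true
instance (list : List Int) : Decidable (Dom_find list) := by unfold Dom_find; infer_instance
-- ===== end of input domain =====

-- B replaces A's quadratic rescan per element by one sort plus a first-index dictionary; return value only, no mutation.

-- ===== PORT A =====
-- the 'for i in list: … return sum' loop of A
def findLoopA (list : List Int) : List Int → Option Int
  | [] => none
  | i :: rest =>
    let sum := list.foldl (fun s j => if j ≥ i then s + 1 else s) (0 : Int)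
    if sum ≤ i then some sum else findLoopA list rest

def find (list : List Int) : Option Int :=
  if list.length ≤ 1 then some 1 else findLoopA list list

-- ===== PORT B =====
-- Source B's 'for idx, v in enumerate(s): if v not in first: first[v] = idx'
def firstIdxDict (s : List Int) : PySem.Dict Int Int :=
  (PySem.List.enumerate s).foldl
    (fun d p => if (d.get? p.2).isSome then d else d.insert p.2 p.1) PySem.Dict.empty

-- Source B's second loop; 'first[i]' never raises since i ∈ list ⊆ keys, so getD is exact here
def findLoopB (n : Int) (first : PySem.Dict Int Int) : List Int → Option Int
  | [] => none
  | i :: rest =>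
    let cnt := n - first.getD i 0
    if cnt ≤ i then some cnt else findLoopB n first rest

def find_alt (list : List Int) : Option Int :=
  let n : Int := list.length
  if n ≤ 1 then some 1
  else findLoopB n (firstIdxDict (PySem.List.sorted list (fun x => x) false)) list

-- ===== PRECONDITION & SPEC =====
def Spec_find (list : List Int) (out : Option Int) : Prop := out = find_alt list
instance (list : List Int) (out : Option Int) : Decidable (Spec_find list out) := by unfold Spec_find; infer_instance

-- ===== CLAIM (what is proved, stated in full; the proofs are below) =====
def Claim_equal_find : Prop := ∀ (list : List Int), Dom_find list → Spec_find list (find list)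

-- ===== LEMMAS AND PROOFS =====

-- A's inner loop counts the elements ≥ i
lemma foldl_count (i : Int) (l : List Int) (acc : Int) :
    l.foldl (fun s j => if j ≥ i then s + 1 else s) acc
      = acc + (l.countP (fun j => decide (i ≤ j)) : Int) := by
  induction l generalizing acc with
  | nil => simp
  | cons x xs ih =>
    simp only [List.foldl_cons, List.countP_cons, ih]
    by_cases h : i ≤ x
    · simp [h]; ring
    · simp [h]

-- existing dict entries survive the first-index fold
lemma g_preserve (ps : List (Int × Int)) (d : PySem.Dict Int Int) (v w : Int)
    (hd : d.get? v = some w) :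
    (ps.foldl (fun d p => if (d.get? p.2).isSome then d else d.insert p.2 p.1) d).get? v = some w := by
  induction ps generalizing d with
  | nil => simpa
  | cons p ps ih =>
    simp only [List.foldl_cons]
    by_cases hs : (d.get? p.2).isSome
    · rw [if_pos hs]; exact ih d hd
    · rw [if_neg hs]
      by_cases hpv : v = p.2
      · exfalso; rw [← hpv, hd] at hs; simp at hs
      · exact ih _ (by rw [PySem.Dict.get?_insert, if_neg hpv]; exact hd)

-- the fold records the index of the FIRST occurrence of each value
lemma g_first (v : Int) : ∀ (s : List Int) (k : Int) (d : PySem.Dict Int Int),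
    d.get? v = none → v ∈ s →
    ((PySem.List.enumerate s k).foldl
        (fun d p => if (d.get? p.2).isSome then d else d.insert p.2 p.1) d).get? v
      = some (k + (s.findIdx (· == v) : Int)) := by
  intro s
  induction s with
  | nil => intro k d _ hv; simp at hv
  | cons x xs ih =>
    intro k d hd hv
    rw [PySem.List.enumerate_cons, List.foldl_cons]
    by_cases hxv : x = v
    · subst hxv
      have hns : ¬ ((d.get? (k, x).2).isSome = true) := by simp [hd]
      rw [if_neg hns]
      rw [g_preserve _ _ _ k (by simp [PySem.Dict.get?_insert_self])]
      simp [List.findIdx_cons]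
    · have hv' : v ∈ xs := by
        rcases List.mem_cons.mp hv with h | h
        · exact absurd h.symm hxv
        · exact h
      have hfi : ((x :: xs).findIdx (· == v) : Int) = (xs.findIdx (· == v) : Int) + 1 := by
        have hb : (x == v) = false := by simp [hxv]
        rw [List.findIdx_cons, hb]
        simp
      by_cases hs : ((d.get? (k, x).2).isSome = true)
      · rw [if_pos hs, ih (k + 1) d hd hv', hfi]; ring_nf
      · rw [if_neg hs,
           ih (k + 1) _ (by rw [PySem.Dict.get?_insert, if_neg (fun h => hxv h.symm)]; exact hd) hv', hfi]
        ring_nf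

-- in a ≤-sorted list the first index of v is the number of elements < v
lemma findIdx_eq_countP_lt (v : Int) : ∀ (s : List Int), s.Pairwise (· ≤ ·) → v ∈ s →
    s.findIdx (· == v) = s.countP (fun j => decide (j < v)) := by
  intro s
  induction s with
  | nil => intro _ hv; simp at hv
  | cons x xs ih =>
    intro hp hv
    have hple := List.pairwise_cons.mp hp
    by_cases hxv : x = v
    · subst hxv
      have h0 : xs.countP (fun j => decide (j < x)) = 0 := by
        rw [List.countP_eq_zero]
        intro j hj
        simpa using not_lt.mpr (hple.1 j hj)
      simp [List.findIdx_cons, h0]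
    · have hv' : v ∈ xs := by
        rcases List.mem_cons.mp hv with h | h
        · exact absurd h.symm hxv
        · exact h
      have hlt : x < v := lt_of_le_of_ne (hple.1 v hv') hxv
      have hb : (x == v) = false := by simp [hxv]
      rw [List.findIdx_cons, List.countP_cons]
      simp [hb, hlt, ih hple.2 hv']

-- counting < v and ≥ v partitions the list
lemma countP_split (v : Int) (l : List Int) :
    l.countP (fun j => decide (j < v)) + l.countP (fun j => decide (v ≤ j)) = l.length := by
  induction l with
  | nil => simp
  | cons x xs ih =>
    rw [List.countP_cons, List.countP_cons, List.length_cons]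
    by_cases h : x < v
    · simp [h, not_le.mpr h]; omega
    · simp [h, not_lt.mp h]; omega

-- the dictionary lookup in B equals A's inner count
lemma lookup_eq (list : List Int) (i : Int) (hi : i ∈ list) :
    (list.length : Int) - (firstIdxDict (PySem.List.sorted list (fun x => x) false)).getD i 0
      = (list.countP (fun j => decide (i ≤ j)) : Int) := by
  set s := PySem.List.sorted list (fun x => x) false with hs
  have hperm : s.Perm list := PySem.List.sorted_perm list (fun x => x) false
  have hmem : i ∈ s := hperm.mem_iff.mpr hi
  have hpair : s.Pairwise (· ≤ ·) := by
    have := PySem.List.sorted_pairwise (xs := list) (key := fun x => x)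
    simpa using this
  have hget : (firstIdxDict s).get? i = some ((0 : Int) + (s.findIdx (· == i) : Int)) :=
    g_first i s 0 PySem.Dict.empty (by simp) hmem
  have hgetD : (firstIdxDict s).getD i 0 = (s.findIdx (· == i) : Int) := by
    rw [PySem.Dict.getD, hget]; simp
  rw [hgetD, findIdx_eq_countP_lt i s hpair hmem]
  have hsplit := countP_split i s
  have hlen : s.length = list.length := hperm.length_eq
  have hc1 : s.countP (fun j => decide (j < i)) = list.countP (fun j => decide (j < i)) :=
    hperm.countP_eq _
  have hc2 := countP_split i list
  rw [hc1]
  omega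

-- the two scanning loops agree element by element
lemma loops_eq (list : List Int) : ∀ (t : List Int), (∀ i ∈ t, i ∈ list) →
    findLoopA list t
      = findLoopB (list.length : Int) (firstIdxDict (PySem.List.sorted list (fun x => x) false)) t := by
  intro t
  induction t with
  | nil => intro _; rfl
  | cons i rest ih =>
    intro hsub
    have hi : i ∈ list := hsub i List.mem_cons_self
    rw [findLoopA, findLoopB]
    simp only [foldl_count i list 0, zero_add, lookup_eq list i hi]
    split
    · rfl
    · exact ih (fun j hj => hsub j (List.mem_cons_of_mem _ hj))

-- ===== VERDICT (by name: the statement is the Claim_ definition above) =====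
theorem find_spec : Claim_equal_find := by
  intro list _
  unfold Spec_find find find_alt
  by_cases h : list.length ≤ 1
  · simp only [h, if_true]
    have : (list.length : Int) ≤ 1 := by exact_mod_cast h
    simp [this]
  · have h' : ¬ ((list.length : Int) ≤ 1) := by exact_mod_cast h
    simp only [h, h', if_false]
    exact loops_eq list list (fun _ h => h)
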